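-- pv_equiv track=rewrite | github.com/nassuphis/specparser | expandspec.py | _split_fcall
-- ===== SOURCE A (Python) =====
-- def _split_fcall(text: str):
--     """
--     Return (pre, body, suf) for the FIRST balanced ${...} in text, or None.
--     Scans braces so inner lists/dicts don't confuse it.
--     """
--     i = text.find("${")
--     if i < 0:
--         return None
--     j = i + 2
--     n = len(text)
--     depth = 1
--     while j < n and depth > 0:
--         ch = text[j]
--         if ch == '{':
--             depth += 1
--         elif ch == '}':
--             depth -= 1
--         j += 1
--     if depth != 0:
--         return None
--     pre = text[:i]
--     body = text[i+2:j-1]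
--     suf = text[j:]
--     return pre, body, suf
-- ===== SOURCE B (Python) =====
-- def _split_fcall(text: str):
--     """
--     Return (pre, body, suf) for the FIRST balanced ${...} in text, or None.
--     Splits at the first "${" with partition, then walks the tail once,
--     accumulating the body and returning the suffix directly at the close.
--     """
--     pre, sep, rest = text.partition("${")
--     if not sep:
--         return None
--     body = []
--     depth = 1
--     for k, ch in enumerate(rest):
--         if ch == '{':
--             depth += 1
--         elif ch == '}':
--             depth -= 1
--             if depth == 0:
--                 return pre, ''.join(body), rest[k+1:]
--         body.append(ch)
--     return None
-- ===== Notes on version B (the rewrite author's own statement) =====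
-- stated objective: alternative
-- what changed: Replaces the index-based while loop plus three post-hoc slices with str.partition at the first "${" and a single for-loop over the tail that accumulates the body characters and returns pre/body/suffix directly when depth reaches 0.
import Mathlib
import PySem

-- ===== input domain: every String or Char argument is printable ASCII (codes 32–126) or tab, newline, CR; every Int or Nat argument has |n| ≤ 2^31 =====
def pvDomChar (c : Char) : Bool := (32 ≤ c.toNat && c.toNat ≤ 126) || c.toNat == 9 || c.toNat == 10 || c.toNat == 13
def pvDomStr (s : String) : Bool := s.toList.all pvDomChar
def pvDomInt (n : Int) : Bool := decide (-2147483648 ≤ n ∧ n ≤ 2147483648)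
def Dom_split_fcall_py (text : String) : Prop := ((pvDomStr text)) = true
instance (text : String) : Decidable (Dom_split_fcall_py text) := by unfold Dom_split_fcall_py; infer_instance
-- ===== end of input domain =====

-- B replaces A's index-based while loop + three post-hoc slices by a partition at the first "${"
-- and a single pass over the tail that accumulates the body and returns the suffix at the close
-- (alternative decomposition, same O(n) cost).

-- ===== PORT A =====
-- the while loop of A: j advances while j < n and depth > 0
def aLoop (cs : List Char) (n : Int) (j : Int) (depth : Int) : Int × Int :=
  if j < n ∧ 0 < depth then
    let ch := PySem.List.pyGetD cs j ' '
    let depth' := if ch = '{' then depth + 1 else if ch = '}' then depth - 1 else depth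
    aLoop cs n (j + 1) depth'
  else (j, depth)
termination_by (n - j).toNat
decreasing_by omega


def split_fcall_py (text : String) : Option (String × String × String) :=
  let i := PySem.Str.find text "${"
  if i < 0 then none
  else
    let n : Int := PySem.Str.len text
    let jd := aLoop text.toList n (i + 2) 1
    if jd.2 ≠ 0 then none
    else some (PySem.Str.slice text none (some i),
               PySem.Str.slice text (some (i + 2)) (some (jd.1 - 1)),
               PySem.Str.slice text (some jd.1) none)

-- ===== PORT B =====
-- the for-loop of B over the tail after "${": accumulate body, return (body, remaining chars) at the close
def bWalk (chars : List Char) (depth : Int) (body : List Char) : Option (List Char × List Char) :=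
  match chars with
  | [] => none
  | ch :: rest =>
    if ch = '{' then bWalk rest (depth + 1) (body ++ [ch])
    else if ch = '}' then
      if depth - 1 = 0 then some (body, rest)
      else bWalk rest (depth - 1) (body ++ [ch])
    else bWalk rest depth (body ++ [ch])


def split_fcall_py_alt (text : String) : Option (String × String × String) :=
  let cs := text.toList
  let i := PySem.Chars.find cs "${".toList
  if i = -1 then none
  else
    match bWalk (cs.drop (i.toNat + 2)) 1 [] with
    | none => none
    | some (body, suf) =>
        some (String.ofList (cs.take i.toNat), String.ofList body, String.ofList suf)


-- ===== PRECONDITION & SPEC =====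
def Spec_split_fcall_py (text : String) (out : Option (String × String × String)) : Prop := out = split_fcall_py_alt text
instance (text : String) (out : Option (String × String × String)) : Decidable (Spec_split_fcall_py text out) := by unfold Spec_split_fcall_py; infer_instance

-- ===== CLAIM (what is proved, stated in full; the proofs are below) =====
def Claim_equal_split_fcall_py : Prop := ∀ (text : String), Dom_split_fcall_py text → Spec_split_fcall_py text (split_fcall_py text)

-- ===== LEMMAS AND PROOFS =====

theorem bWalk_none_aux (cs : List Char) (l : List Char) :
    ∀ (j : Nat) (depth : Int) (body : List Char), cs.drop j = l → 0 < depth →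
    bWalk l depth body = none → (aLoop cs (cs.length : Int) (j : Int) depth).2 ≠ 0 := by
  induction l with
  | nil =>
    intro j depth body hdrop hd _
    have hlen : cs.length ≤ j := List.drop_eq_nil_iff.mp hdrop
    rw [aLoop, if_neg (by omega)]
    simpa using (by omega : depth ≠ 0)
  | cons ch rest ih =>
    intro j depth body hdrop hd hb
    have hj : j < cs.length := by
      by_contra h
      rw [List.drop_eq_nil_iff.mpr (by omega)] at hdrop; exact absurd hdrop (by simp)
    have hget := List.drop_eq_getElem_cons hj
    rw [hdrop] at hget
    obtain ⟨hch, hrest⟩ : ch = cs[j] ∧ rest = cs.drop (j+1) := by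
      constructor <;> [exact (List.cons.injEq ..).mp hget |>.1; exact (List.cons.injEq ..).mp hget |>.2]
    rw [aLoop, if_pos ⟨by exact_mod_cast hj, hd⟩]
    have hgd : PySem.List.pyGetD cs (j:Int) ' ' = cs[j] :=
      PySem.List.pyGetD_eq_getElem cs ' ' (by omega) (by exact_mod_cast hj) |>.trans (by simp)
    simp only [hgd, ← hch]
    unfold bWalk at hb
    by_cases h1 : ch = '{'
    · subst h1
      rw [if_pos rfl] at hb
      rw [if_pos rfl]
      have := ih (j+1) (depth+1) (body ++ ['{']) hrest.symm (by omega) (by simpa using hb)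
      simpa [Int.natCast_add] using this
    · by_cases h2 : ch = '}'
      · subst h2
        rw [if_neg h1, if_pos rfl] at hb
        rw [if_neg h1, if_pos rfl]
        by_cases h3 : depth - 1 = 0
        · rw [if_pos h3] at hb; exact absurd hb (by simp)
        · rw [if_neg h3] at hb
          have := ih (j+1) (depth-1) (body ++ ['}']) hrest.symm (by omega) hb
          simpa [Int.natCast_add] using this
      · simp only [if_neg h1, if_neg h2] at hb ⊢
        have := ih (j+1) depth (body ++ [ch]) hrest.symm hd hb
        simpa [Int.natCast_add] using this

theorem bWalk_some_aux (cs : List Char) (l : List Char) :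
    ∀ (j : Nat) (depth : Int) (body : List Char) (b s : List Char), cs.drop j = l → 0 < depth →
    bWalk l depth body = some (b, s) →
    ∃ jn : Nat, j < jn ∧ jn ≤ cs.length ∧
      aLoop cs (cs.length : Int) (j : Int) depth = ((jn : Int), 0) ∧
      b = body ++ (cs.drop j).take (jn - 1 - j) ∧ s = cs.drop jn := by
  induction l with
  | nil => intro j depth body b s hdrop hd hb; exact absurd hb (by simp [bWalk])
  | cons ch rest ih =>
    intro j depth body b s hdrop hd hb
    have hj : j < cs.length := by
      by_contra h
      rw [List.drop_eq_nil_iff.mpr (by omega)] at hdrop; exact absurd hdrop (by simp)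
    have hget := List.drop_eq_getElem_cons hj
    rw [hdrop] at hget
    obtain ⟨hch, hrest⟩ : ch = cs[j] ∧ rest = cs.drop (j+1) := by
      constructor <;> [exact (List.cons.injEq ..).mp hget |>.1; exact (List.cons.injEq ..).mp hget |>.2]
    have hstep : cs.drop j = ch :: cs.drop (j+1) := by rw [hdrop, hrest]
    rw [aLoop, if_pos ⟨by exact_mod_cast hj, hd⟩]
    have hgd : PySem.List.pyGetD cs (j:Int) ' ' = cs[j] :=
      PySem.List.pyGetD_eq_getElem cs ' ' (by omega) (by exact_mod_cast hj) |>.trans (by simp)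
    simp only [hgd, ← hch]
    unfold bWalk at hb
    by_cases h1 : ch = '{'
    · subst h1
      rw [if_pos rfl] at hb
      rw [if_pos rfl]
      obtain ⟨jn, h1, h2, h3, h4, h5⟩ := ih (j+1) (depth+1) (body ++ ['{']) b s hrest.symm (by omega) hb
      refine ⟨jn, by omega, h2, by rw [← h3]; norm_cast, ?_, h5⟩
      rw [h4, hstep, List.append_assoc, List.singleton_append]
      congr 1
      rw [List.take_cons (by omega)]
      congr 1
    · by_cases h2 : ch = '}'
      · subst h2
        rw [if_neg h1, if_pos rfl] at hb
        rw [if_neg h1, if_pos rfl]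
        by_cases h3 : depth - 1 = 0
        · rw [if_pos h3] at hb
          obtain ⟨hb1, hb2⟩ : body = b ∧ rest = s := by
            have := (Option.some.injEq ..).mp hb; exact ⟨(Prod.mk.injEq ..).mp this |>.1, (Prod.mk.injEq ..).mp this |>.2⟩
          refine ⟨j+1, by omega, by omega, ?_, ?_, by rw [← hb2, hrest]⟩
          · rw [aLoop, if_neg (by omega)]; simp only [h3]; norm_cast
          · simp [← hb1]
        · rw [if_neg h3] at hb
          obtain ⟨jn, g1, g2, g3, g4, g5⟩ := ih (j+1) (depth-1) (body ++ ['}']) b s hrest.symm (by omega) hb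
          refine ⟨jn, by omega, g2, by rw [← g3]; norm_cast, ?_, g5⟩
          rw [g4, hstep, List.append_assoc, List.singleton_append]
          congr 1
          rw [List.take_cons (by omega)]
          congr 1
      · rw [if_neg h1, if_neg h2] at hb
        rw [if_neg h1, if_neg h2]
        obtain ⟨jn, g1, g2, g3, g4, g5⟩ := ih (j+1) depth (body ++ [ch]) b s hrest.symm hd hb
        refine ⟨jn, by omega, g2, by rw [← g3]; norm_cast, ?_, g5⟩
        rw [g4, hstep, List.append_assoc, List.singleton_append]
        congr 1
        rw [List.take_cons (by omega)]
        congr 1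


theorem ports_agree (text : String) : split_fcall_py text = split_fcall_py_alt text := by
  unfold split_fcall_py split_fcall_py_alt
  have hneg := PySem.Chars.neg_one_le_find text.toList "${".toList
  have hfind : PySem.Str.find text "${" = PySem.Chars.find text.toList "${".toList := by
    simp
  rw [hfind]
  by_cases h0 : PySem.Chars.find text.toList "${".toList < 0
  · rw [if_pos h0, if_pos (by omega)]
  · have hK : PySem.Chars.find text.toList "${".toList =
        ((PySem.Chars.find text.toList "${".toList).toNat : Int) := by omega
    have hBne : ¬ (PySem.Chars.find text.toList "${".toList = -1) := by omega
    have hlen : PySem.Str.len text = text.toList.length := by simp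
    rw [if_neg h0, if_neg hBne, hK, hlen]
    generalize hkdef : (PySem.Chars.find text.toList "${".toList).toNat = k at hK
    simp only [Int.toNat_natCast]
    have hpre : "${".toList <+: text.toList.drop k := by
      have := (PySem.Chars.find_spec (s := text.toList) (sub := "${".toList) (by omega)).1
      rwa [hkdef] at this
    have hklen : k + 2 ≤ text.toList.length := by
      have h2 := hpre.length_le
      simp [List.length_drop] at h2
      have h3 : text.toList.length = text.length := by simp
      omega
    have hcast : ((k : Int) + 2) = ((k + 2 : Nat) : Int) := by omega
    cases hbw : bWalk (text.toList.drop (k + 2)) 1 [] with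
    | none =>
      have hne := bWalk_none_aux text.toList (text.toList.drop (k+2)) (k+2) 1 [] rfl
        (by norm_num) hbw
      rw [hcast, if_pos hne]
    | some bs =>
      obtain ⟨b, s⟩ := bs
      obtain ⟨jn, g1, g2, g3, g4, g5⟩ :=
        bWalk_some_aux text.toList (text.toList.drop (k+2)) (k+2) 1 [] b s rfl (by norm_num) hbw
      rw [hcast, g3, if_neg (show ¬(((jn : Int), (0:Int)).2 ≠ 0) by simp)]
      refine congrArg some ?_
      refine Prod.ext ?_ (Prod.ext ?_ ?_)
      · apply String.toList_inj.mp
        simp [PySem.Str.toList_slice, PySem.List.slice_to_natCast]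
      · apply String.toList_inj.mp
        have hjn1 : (((jn : Int), (0:Int)).1 - 1) = ((jn - 1 : Nat) : Int) := by simp; omega
        simp only [PySem.Str.toList_slice, PySem.Chars.slice_eq_listSlice, hjn1]
        rw [PySem.List.slice_natCast]
        simp [g4]
      · apply String.toList_inj.mp
        simp [PySem.Str.toList_slice, PySem.List.slice_from_natCast, g5]

-- ===== VERDICT (by name: the statement is the Claim_ definition above) =====
theorem split_fcall_py_spec : Claim_equal_split_fcall_py := by
  intro text _
  unfold Spec_split_fcall_py
  exact ports_agree text
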